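-- pv_equiv track=rewrite | github.com/johnap81/johnsstockapp | server.py | _t212_ticker_looks_eu
-- ===== SOURCE A (Python) =====
-- def _t212_ticker_looks_eu(ticker: str) -> bool:
--     u = (ticker or "").upper()
--     for m in (
--         "_DE_EQ",
--         "_FR_EQ",
--         "_NL_EQ",
--         "_ES_EQ",
--         "_IT_EQ",
--         "_AT_EQ",
--         "_BE_EQ",
--         "_IE_EQ",
--         "_PL_EQ",
--         "_SE_EQ",
--         "_DK_EQ",
--         "_FI_EQ",
--         "_PT_EQ",
--         "_CH_EQ",  # often used for SIX; still European venue
--     ):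
--         if m in u:
--             return True
--     return False
-- ===== SOURCE B (Python) =====
-- EU_CODES = frozenset({"DE", "FR", "NL", "ES", "IT", "AT", "BE", "IE",
--                       "PL", "SE", "DK", "FI", "PT", "CH"})
--
--
-- def _eu_window(w: str) -> bool:
--     # w is a 6-char candidate window "_XX_EQ"
--     return len(w) == 6 and w[0] == "_" and w[3:] == "_EQ" and w[1:3] in EU_CODES
--
--
-- def _t212_ticker_looks_eu(ticker: str) -> bool:
--     u = (ticker or "").upper()
--     return any(_eu_window(u[i:i + 6]) for i in range(len(u)))
-- ===== Notes on version B (the rewrite author's own statement) =====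
-- stated objective: idiomatic
-- what changed: Instead of running 14 separate substring searches (one marker per country), B makes a single scan over the window positions of the upper-cased ticker and tests each 6-char window for the underscore-code-underscore-EQ shape with the two-letter code looked up in a frozenset of the 14 country codes.
import Mathlib
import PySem

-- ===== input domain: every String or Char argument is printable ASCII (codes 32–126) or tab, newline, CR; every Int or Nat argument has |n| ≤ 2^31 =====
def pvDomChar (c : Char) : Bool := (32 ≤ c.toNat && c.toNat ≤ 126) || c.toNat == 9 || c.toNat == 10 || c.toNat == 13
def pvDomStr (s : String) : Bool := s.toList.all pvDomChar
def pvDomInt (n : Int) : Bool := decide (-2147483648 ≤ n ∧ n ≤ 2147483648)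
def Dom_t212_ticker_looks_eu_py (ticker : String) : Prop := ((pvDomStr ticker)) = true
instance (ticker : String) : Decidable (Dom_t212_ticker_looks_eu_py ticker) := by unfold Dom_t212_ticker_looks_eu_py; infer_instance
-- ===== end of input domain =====

-- B replaces A's 14 separate substring searches by one scan over window positions
-- with a set membership test on the two-letter country code (objective: idiomatic).

-- ===== PORT A =====
-- the tuple of marker substrings A iterates over
def pvMarkers : List String :=
  ["_DE_EQ", "_FR_EQ", "_NL_EQ", "_ES_EQ", "_IT_EQ", "_AT_EQ", "_BE_EQ",
   "_IE_EQ", "_PL_EQ", "_SE_EQ", "_DK_EQ", "_FI_EQ", "_PT_EQ", "_CH_EQ"]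

def t212_ticker_looks_eu_py (ticker : String) : Bool :=
  let u := PySem.Str.upper (if ticker = "" then "" else ticker)  -- (ticker or "").upper()
  pvMarkers.any (fun m => PySem.Str.isIn m u)  -- for m in (…): if m in u: return True / return False

-- ===== PORT B =====
-- the frozenset EU_CODES, as lists of characters
def pvEuCodes : List (List Char) :=
  [['D','E'], ['F','R'], ['N','L'], ['E','S'], ['I','T'], ['A','T'], ['B','E'],
   ['I','E'], ['P','L'], ['S','E'], ['D','K'], ['F','I'], ['P','T'], ['C','H']]

-- _eu_window(w): w[0:1] == "_" and w[1:3] in EU_CODES and w[3:] == "_EQ"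
-- (slices with nonnegative bounds on the char list: w[a:b] = (w.drop a).take (b-a), w[a:] = w.drop a)
def pvEuWindow (w : List Char) : Bool :=
  decide (w.take 1 = ['_']) && pvEuCodes.contains ((w.drop 1).take 2)
    && decide (w.drop 3 = ['_', 'E', 'Q'])

def t212_ticker_looks_eu_py_alt (ticker : String) : Bool :=
  let u := (PySem.Str.upper (if ticker = "" then "" else ticker)).toList
  -- any(_eu_window(u[i:i+6]) for i in range(len(u)))
  (List.range u.length).any (fun i => pvEuWindow ((u.drop i).take 6))

-- ===== PRECONDITION & SPEC =====
def Spec_t212_ticker_looks_eu_py (ticker : String) (out : Bool) : Prop := out = t212_ticker_looks_eu_py_alt ticker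
instance (ticker : String) (out : Bool) : Decidable (Spec_t212_ticker_looks_eu_py ticker out) := by unfold Spec_t212_ticker_looks_eu_py; infer_instance

-- ===== CLAIM (what is proved, stated in full; the proofs are below) =====
def Claim_equal_t212_ticker_looks_eu_py : Prop := ∀ (ticker : String), Dom_t212_ticker_looks_eu_py ticker → Spec_t212_ticker_looks_eu_py ticker (t212_ticker_looks_eu_py ticker)

-- ===== LEMMAS AND PROOFS =====
-- every marker has 6 characters and its character list passes B's window test
lemma pv_marker_spec : ∀ m ∈ pvMarkers, m.toList.length = 6 ∧ pvEuWindow m.toList = true := by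
  decide

-- a character list passing B's window test is the character list of some marker
lemma pv_window_marker (w : List Char) (h : pvEuWindow w = true) :
    ∃ m ∈ pvMarkers, m.toList = w := by
  simp only [pvEuWindow, Bool.and_eq_true, decide_eq_true_eq] at h
  obtain ⟨⟨h1, h2⟩, h3⟩ := h
  obtain ⟨c, t, rfl⟩ : ∃ c t, w = c :: t := by
    cases w with
    | nil => simp at h1
    | cons c t => exact ⟨c, t, rfl⟩
  obtain rfl : c = '_' := by simpa using h1
  obtain ⟨a, b, t3, rfl⟩ : ∃ a b t3, t = a :: b :: t3 := by
    cases t with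
    | nil => simp [pvEuCodes] at h2
    | cons a t2 =>
      cases t2 with
      | nil => simp [pvEuCodes] at h2
      | cons b t3 => exact ⟨a, b, t3, rfl⟩
  obtain rfl : t3 = ['_', 'E', 'Q'] := by simpa using h3
  simp only [List.take, List.drop, List.contains_eq_mem, decide_eq_true_eq, pvEuCodes,
    List.mem_cons, List.not_mem_nil, or_false] at h2
  rcases h2 with h | h | h | h | h | h | h | h | h | h | h | h | h | h <;>
    (obtain ⟨rfl, rfl⟩ : _ ∧ _ := by simpa using h) <;> decide

-- the heart of the equivalence: on any character list, "some marker occurs as a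
-- substring" (A's scan over the 14 markers) equals "some 6-char window passes
-- B's shape-and-code test" (B's scan over positions)
lemma pv_key (v : List Char) :
    (pvMarkers.any fun m => PySem.Chars.isIn m.toList v)
      = (List.range v.length).any (fun i => pvEuWindow ((v.drop i).take 6)) := by
  rw [Bool.eq_iff_iff]
  simp only [List.any_eq_true, List.mem_range]
  constructor
  · rintro ⟨m, hm, hin⟩
    obtain ⟨hlen, hwin⟩ := pv_marker_spec m hm
    obtain ⟨j, hpre⟩ := (PySem.Chars.exists_prefix_drop_iff_isIn m.toList v).2 hin
    have hj : j < v.length := by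
      by_contra hge
      have : v.drop j = [] := List.drop_eq_nil_of_le (by omega)
      rw [this, List.prefix_nil] at hpre
      rw [hpre] at hlen; simp at hlen
    refine ⟨j, hj, ?_⟩
    have : m.toList = (v.drop j).take 6 := by
      have := List.prefix_iff_eq_take.1 hpre
      rwa [hlen] at this
    rwa [this] at hwin
  · rintro ⟨i, _, hwin⟩
    obtain ⟨m, hm, hmw⟩ := pv_window_marker _ hwin
    refine ⟨m, hm, (PySem.Chars.exists_prefix_drop_iff_isIn m.toList v).1 ⟨i, ?_⟩⟩
    rw [hmw]
    exact List.take_prefix _ _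

-- ===== VERDICT (by name: the statement is the Claim_ definition above) =====
theorem t212_ticker_looks_eu_py_spec : Claim_equal_t212_ticker_looks_eu_py := by
  intro ticker _
  unfold Spec_t212_ticker_looks_eu_py t212_ticker_looks_eu_py t212_ticker_looks_eu_py_alt
  simp only [pysem]
  exact pv_key _
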